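-- pv_equiv track=rewrite | github.com/GavenHwang/pythonPractice | 00_practice/solution/solution_01.py | screen_end
-- ===== SOURCE A (Python) =====
-- def screen_end(s):
--     screen = ''
--     clip = ''
--     selected = False
--     for i in s:
--         if i == '1' and not selected:  # a
--             screen += 'a'
--         elif i == '1' and selected:  # a
--             screen = 'a'
--             selected = False
--         elif i == '2' and selected and screen:  # ctrl-c
--             clip = screen
--         elif i == '3' and selected and screen:  # ctrl-x
--             clip = screen
--             screen = ''
--             selected = False
--         elif i == '4' and selected:  # ctrl-v
--             screen = clip
--             selected = False
--         elif i == '4' and not selected:  # ctrl-v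
--             screen += clip
--         elif i == '5' and screen:  # ctrl-a
--             selected = True
--     return len(screen)
-- ===== SOURCE B (Python) =====
-- def screen_end(s):
--     # Run-length strategy: scan maximal runs of equal commands and apply a
--     # closed-form effect per run on integer lengths (a run of k '1's types k
--     # chars, a run of k '4's pastes k*clip chars; '2'/'3'/'5' are idempotent).
--     sl = 0          # length of screen
--     cl = 0          # length of clipboard
--     sel = False
--     i, n = 0, len(s)
--     while i < n:
--         c = s[i]
--         j = i
--         while j < n and s[j] == c:
--             j += 1
--         k = j - i   # run length
--         if c == '1':
--             sl = (0 if sel else sl) + k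
--             sel = False
--         elif c == '2':
--             if sel and sl:
--                 cl = sl
--         elif c == '3':
--             if sel and sl:
--                 cl, sl, sel = sl, 0, False
--         elif c == '4':
--             sl = (0 if sel else sl) + k * cl
--             sel = False
--         elif c == '5':
--             if sl:
--                 sel = True
--         i = j
--     return sl
-- ===== Notes on version B (the rewrite author's own statement) =====
-- stated objective: alternative
-- what changed: B scans maximal runs of equal commands and applies a closed-form arithmetic effect per run on integer lengths (k '1's add k, k '4's add k*clip, '2'/'3'/'5' are idempotent), instead of A's per-character string-building state machine.
import Mathlib
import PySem

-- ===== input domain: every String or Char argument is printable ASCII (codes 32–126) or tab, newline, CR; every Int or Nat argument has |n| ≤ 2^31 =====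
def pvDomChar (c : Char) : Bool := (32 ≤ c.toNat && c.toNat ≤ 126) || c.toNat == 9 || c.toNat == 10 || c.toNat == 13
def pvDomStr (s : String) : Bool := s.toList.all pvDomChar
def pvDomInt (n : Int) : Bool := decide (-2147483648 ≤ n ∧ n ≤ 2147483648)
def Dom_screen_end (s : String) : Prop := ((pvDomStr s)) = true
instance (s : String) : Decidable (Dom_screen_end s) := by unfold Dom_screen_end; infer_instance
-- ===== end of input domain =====

-- B replaces A's per-character string-building state machine by a run-length scan with a
-- closed-form integer-length effect per run of equal commands (objective: alternative).

-- ===== PORT A =====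
-- state: (screen, clip, selected); strings as List Char, appended exactly as A does
def pvStepA (st : List Char × List Char × Bool) (c : Char) : List Char × List Char × Bool :=
  match st with
  | (screen, clip, selected) =>
    if c = '1' ∧ ¬selected then (screen ++ ['a'], clip, selected)
    else if c = '1' ∧ selected then (['a'], clip, false)
    else if c = '2' ∧ selected ∧ screen ≠ [] then (screen, screen, selected)
    else if c = '3' ∧ selected ∧ screen ≠ [] then ([], screen, false)
    else if c = '4' ∧ selected then (clip, clip, false)
    else if c = '4' ∧ ¬selected then (screen ++ clip, clip, selected)
    else if c = '5' ∧ screen ≠ [] then (screen, clip, true)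
    else (screen, clip, selected)

def screen_end (s : String) : Int :=
  ((s.toList.foldl pvStepA ([], [], false)).1.length : Int)

-- ===== PORT B =====
-- closed-form effect of a run of k copies of command c on (len screen, len clip, selected)
def pvStepRun (st : Int × Int × Bool) (c : Char) (k : Nat) : Int × Int × Bool :=
  match st with
  | (sl, cl, sel) =>
    if c = '1' then ((if sel then 0 else sl) + (k : Int), cl, false)
    else if c = '2' then (if sel ∧ sl ≠ 0 then (sl, sl, sel) else (sl, cl, sel))
    else if c = '3' then (if sel ∧ sl ≠ 0 then (0, sl, false) else (sl, cl, sel))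
    else if c = '4' then ((if sel then 0 else sl) + (k : Int) * cl, cl, false)
    else if c = '5' then (if sl ≠ 0 then (sl, cl, true) else (sl, cl, sel))
    else (sl, cl, sel)

-- the outer while loop of Source B: peel off the leading maximal run, apply its closed form
def pvLoopB (l : List Char) (st : Int × Int × Bool) : Int × Int × Bool :=
  match l with
  | [] => st
  | c :: rest =>
    pvLoopB (rest.dropWhile (fun x => x = c))
      (pvStepRun st c ((rest.takeWhile (fun x => x = c)).length + 1))
termination_by l.length
decreasing_by
  simp only [List.length_cons]
  exact Nat.lt_succ_of_le (List.length_dropWhile_le _ _)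

def screen_end_alt (s : String) : Int :=
  (pvLoopB s.toList (0, 0, false)).1

-- ===== PRECONDITION & SPEC =====
def Spec_screen_end (s : String) (out : Int) : Prop := out = screen_end_alt s
instance (s : String) (out : Int) : Decidable (Spec_screen_end s out) := by unfold Spec_screen_end; infer_instance

-- ===== CLAIM (what is proved, stated in full; the proofs are below) =====
def Claim_equal_screen_end : Prop := ∀ (s : String), Dom_screen_end s → Spec_screen_end s (screen_end s)

-- ===== LEMMAS AND PROOFS =====
-- abstraction: lengths of A's strings
def pvAbs (st : List Char × List Char × Bool) : Int × Int × Bool :=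
  ((st.1.length : Int), (st.2.1.length : Int), st.2.2)

-- proof-only per-character step on lengths (mirror of pvStepA through pvAbs)
def pvStepC (st : Int × Int × Bool) (c : Char) : Int × Int × Bool :=
  match st with
  | (sl, cl, selected) =>
    if c = '1' then ((if ¬selected then sl + 1 else 1), cl, false)
    else if c = '2' then (if selected ∧ sl ≠ 0 then (sl, sl, selected) else (sl, cl, selected))
    else if c = '3' then (if selected ∧ sl ≠ 0 then (0, sl, false) else (sl, cl, selected))
    else if c = '4' then (if selected then (cl, cl, false) else (sl + cl, cl, selected))
    else if c = '5' then (if sl ≠ 0 then (sl, cl, true) else (sl, cl, selected))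
    else (sl, cl, selected)

theorem pvStep_comm (st : List Char × List Char × Bool) (c : Char) :
    pvStepC (pvAbs st) c = pvAbs (pvStepA st c) := by
  obtain ⟨screen, clip, selected⟩ := st
  simp only [pvAbs, pvStepA, pvStepC]
  by_cases h1 : c = '1' <;> by_cases hsel : selected <;>
    by_cases hsc : screen = [] <;>
    by_cases h2 : c = '2' <;> by_cases h3 : c = '3' <;>
    by_cases h4 : c = '4' <;> by_cases h5 : c = '5' <;>
    simp_all

theorem pvFold_comm (l : List Char) (st : List Char × List Char × Bool) :
    l.foldl pvStepC (pvAbs st) = pvAbs (l.foldl pvStepA st) := by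
  induction l generalizing st with
  | nil => rfl
  | cons c l ih => simp [List.foldl, pvStep_comm, ih]

theorem pvStepRun_one (st : Int × Int × Bool) (c : Char) :
    pvStepRun st c 1 = pvStepC st c := by
  obtain ⟨sl, cl, sel⟩ := st
  simp only [pvStepRun, pvStepC]
  by_cases h1 : c = '1' <;> by_cases hsel : sel <;> simp_all

theorem pvStepRun_succ (st : Int × Int × Bool) (c : Char) (k : Nat) :
    pvStepRun st c (k + 1) = pvStepC (pvStepRun st c k) c := by
  obtain ⟨sl, cl, sel⟩ := st
  simp only [pvStepRun, pvStepC]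
  by_cases h1 : c = '1' <;> by_cases h2 : c = '2' <;> by_cases h3 : c = '3' <;>
    by_cases h4 : c = '4' <;> by_cases h5 : c = '5' <;>
    by_cases hsel : sel <;> simp_all
  all_goals first
    | (split_ifs <;> simp_all)
    | (push_cast; ring)

theorem pvRun_fold (c : Char) (k : Nat) (st : Int × Int × Bool) (hk : 1 ≤ k) :
    (List.replicate k c).foldl pvStepC st = pvStepRun st c k := by
  induction k with
  | zero => omega
  | succ n ih =>
    rcases Nat.eq_or_lt_of_le hk with h | h
    · obtain rfl : n = 0 := by omega
      simp [List.replicate, List.foldl, pvStepRun_one]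
    · have hn : 1 ≤ n := by omega
      rw [List.replicate_succ', List.foldl_append, ih hn]
      simp [List.foldl, pvStepRun_succ]

theorem pvLoopB_eq_aux (n : Nat) : ∀ (l : List Char), l.length ≤ n →
    ∀ (st : List Char × List Char × Bool),
    pvLoopB l (pvAbs st) = pvAbs (l.foldl pvStepA st) := by
  induction n with
  | zero =>
    intro l hl st
    rw [List.eq_nil_of_length_eq_zero (Nat.le_zero.mp hl), pvLoopB]
    rfl
  | succ n ihn =>
    intro l hl st
    match l with
    | [] => rw [pvLoopB]; rfl
    | c :: rest =>
    have ih : ∀ st, pvLoopB (rest.dropWhile (fun x => x = c)) (pvAbs st)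
        = pvAbs ((rest.dropWhile (fun x => x = c)).foldl pvStepA st) := by
      intro st
      exact ihn _ (by
        have := List.length_dropWhile_le (fun x => x = c) rest
        simp at hl; omega) st
    rw [pvLoopB]
    have hrepl : c :: rest.takeWhile (fun x => x = c)
        = List.replicate ((rest.takeWhile (fun x => x = c)).length + 1) c := by
      rw [List.eq_replicate_iff]
      refine ⟨by simp, ?_⟩
      intro b hb
      rcases List.mem_cons.mp hb with h | h
      · exact h
      · simpa using List.mem_takeWhile_imp h
    have hsplit : c :: rest
        = (c :: rest.takeWhile (fun x => x = c)) ++ rest.dropWhile (fun x => x = c) := by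
      simp [List.takeWhile_append_dropWhile]
    calc pvLoopB (rest.dropWhile (fun x => x = c))
          (pvStepRun (pvAbs st) c ((rest.takeWhile (fun x => x = c)).length + 1))
        = pvLoopB (rest.dropWhile (fun x => x = c))
          ((List.replicate ((rest.takeWhile (fun x => x = c)).length + 1) c).foldl pvStepC (pvAbs st)) := by
          rw [pvRun_fold _ _ _ (by omega)]
      _ = pvLoopB (rest.dropWhile (fun x => x = c))
          (pvAbs ((List.replicate ((rest.takeWhile (fun x => x = c)).length + 1) c).foldl pvStepA st)) := by
          rw [pvFold_comm]
      _ = pvAbs ((rest.dropWhile (fun x => x = c)).foldl pvStepA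
          ((List.replicate ((rest.takeWhile (fun x => x = c)).length + 1) c).foldl pvStepA st)) := ih _
      _ = pvAbs ((c :: rest).foldl pvStepA st) := by
          rw [← List.foldl_append, ← hrepl, ← hsplit]

theorem pvLoopB_eq (l : List Char) (st : List Char × List Char × Bool) :
    pvLoopB l (pvAbs st) = pvAbs (l.foldl pvStepA st) :=
  pvLoopB_eq_aux l.length l le_rfl st

-- ===== VERDICT (by name: the statement is the Claim_ definition above) =====
theorem screen_end_spec : Claim_equal_screen_end := by
  intro s _
  unfold Spec_screen_end screen_end screen_end_alt
  have h := pvLoopB_eq s.toList ([], [], false)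
  simp only [pvAbs, List.length_nil, Nat.cast_zero] at h
  rw [h]
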